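-- pv_equiv track=rewrite | github.com/Novus-Engine/novuspack | scripts/lib/_validation_utils.py | build_heading_hierarchy
-- ===== SOURCE A (Python) =====
-- from typing import Optional, List, Set, Tuple, Dict
--
-- def build_heading_hierarchy(
--     headings: List[Tuple[int, int, str]]  # (line_num, level, text)
-- ) -> Dict[int, Optional[int]]:
--     """
--     Build parent-child relationship mapping for headings.
--
--     Uses heading_stack approach similar to validate_heading_numbering.py.
--     Each heading finds its most recent parent at the appropriate level.
--
--     Args:
--         headings: List of (line_num, level, text) tuples, sorted by line_num
--
--     Returns:
--         Dict mapping heading index (0-based) -> parent heading index (None if no parent).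
--         If H3+ appears before H2, it has no parent (None).
--     """
--     hierarchy = {}
--     heading_stack = {}  # Maps level -> heading_index (current parent at that level)
--
--     for idx, (line_num, level, text) in enumerate(headings):
--         parent_index = None
--         if level > 2:
--             # H3 and beyond need a parent
--             parent_level = level - 1
--             if parent_level in heading_stack:
--                 parent_index = heading_stack[parent_level]
--
--         hierarchy[idx] = parent_index
--
--         # Update heading stack - set this heading as the current parent at its level
--         heading_stack[level] = idx
--
--         # Clear deeper levels when we move up in hierarchy
--         levels_to_clear = [lvl for lvl in heading_stack.keys() if lvl > level]
--         for lvl in levels_to_clear: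
--             del heading_stack[lvl]
--
--     return hierarchy
-- ===== SOURCE B (Python) =====
-- def build_heading_hierarchy(headings):
--     """Stateless re-implementation: for each heading, scan backwards to the
--     first earlier heading of level <= level-1; it is the parent iff its level
--     is exactly level-1 (a strictly shallower heading in between cuts the link)."""
--     levels = [level for _, level, _ in headings]
--     hierarchy = {}
--     for i, level in enumerate(levels):
--         parent = None
--         if level > 2:
--             for j in range(i - 1, -1, -1):
--                 if levels[j] <= level - 1:
--                     if levels[j] == level - 1:
--                         parent = j
--                     break
--         hierarchy[i] = parent
--     return hierarchy
-- ===== Notes on version B (the rewrite author's own statement) =====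
-- stated objective: alternative
-- what changed: Replaces A's incrementally maintained level->index dict (with per-heading key-scan clearing of deeper levels) by a stateless per-heading backward scan: the parent of heading i is the first earlier heading of level <= level_i-1, taken iff its level is exactly level_i-1.
import Mathlib
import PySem

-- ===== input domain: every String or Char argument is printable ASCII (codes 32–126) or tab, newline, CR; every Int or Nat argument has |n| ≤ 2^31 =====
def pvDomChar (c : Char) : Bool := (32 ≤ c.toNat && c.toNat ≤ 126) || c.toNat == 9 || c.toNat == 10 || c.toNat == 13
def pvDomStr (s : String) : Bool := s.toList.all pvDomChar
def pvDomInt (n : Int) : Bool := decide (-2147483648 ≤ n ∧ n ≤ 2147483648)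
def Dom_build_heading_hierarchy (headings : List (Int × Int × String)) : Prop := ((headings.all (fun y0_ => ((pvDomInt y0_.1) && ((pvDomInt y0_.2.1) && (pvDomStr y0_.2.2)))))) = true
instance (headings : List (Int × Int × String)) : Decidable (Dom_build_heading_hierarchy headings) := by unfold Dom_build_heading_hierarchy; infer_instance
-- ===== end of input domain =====

-- B drops A's incrementally maintained level→index dict entirely and instead,
-- for each heading, scans backwards for the first earlier heading of level ≤
-- level-1, taking it as parent iff its level is exactly level-1 (objective:
-- alternative); return value only, neither version mutates its input.

-- ===== PORT A =====
-- the for-loop of A: state = (enumerate index, hierarchy dict, heading_stack dict)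
def aLoop (hs : List (Int × Int × String)) (idx : Int)
    (hierarchy : PySem.Dict Int (Option Int)) (stack : PySem.Dict Int Int) :
    PySem.Dict Int (Option Int) :=
  match hs with
  | [] => hierarchy
  | (_, level, _) :: rest =>
      -- parent_index = None; if level > 2 and (level-1) in heading_stack: parent_index = heading_stack[level-1]
      let parent_index : Option Int :=
        if 2 < level then
          if stack.contains (level - 1) then stack.get? (level - 1) else none
        else none
      let hierarchy' := hierarchy.insert idx parent_index
      let stack' := stack.insert level idx
      let levels_to_clear := stack'.keys.filter (fun l => decide (level < l))
      let stack'' := levels_to_clear.foldl (fun s l => s.erase l) stack'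
      aLoop rest (idx + 1) hierarchy' stack''

def build_heading_hierarchy (headings : List (Int × Int × String)) : List (Int × Option Int) :=
  (aLoop headings 0 PySem.Dict.empty PySem.Dict.empty).items

-- ===== PORT B =====
-- the inner `for j in range(i-1,-1,-1)` of Source B: `rev` is the prefix
-- levels[0..i-1] paired with their indices, most recent first, so walking it
-- front-to-back is exactly the backward index loop (break at the first hit)
def scanBack (rev : List (Int × Int)) (level : Int) : Option Int :=
  match rev with
  | [] => none
  | (j, l) :: rest =>
      if l ≤ level - 1 then (if l = level - 1 then some j else none)
      else scanBack rest level

def bLoop (hs : List (Int × Int × String)) (idx : Int) (rev : List (Int × Int)) :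
    List (Int × Option Int) :=
  match hs with
  | [] => []
  | (_, level, _) :: rest =>
      let parent : Option Int := if 2 < level then scanBack rev level else none
      (idx, parent) :: bLoop rest (idx + 1) ((idx, level) :: rev)

def build_heading_hierarchy_alt (headings : List (Int × Int × String)) : List (Int × Option Int) :=
  bLoop headings 0 []

-- ===== PRECONDITION & SPEC =====
def Spec_build_heading_hierarchy (headings : List (Int × Int × String)) (out : List (Int × Option Int)) : Prop := out = build_heading_hierarchy_alt headings
instance (headings : List (Int × Int × String)) (out : List (Int × Option Int)) : Decidable (Spec_build_heading_hierarchy headings out) := by unfold Spec_build_heading_hierarchy; infer_instance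

-- ===== CLAIM (what is proved, stated in full; the proofs are below) =====
def Claim_equal_build_heading_hierarchy : Prop := ∀ (headings : List (Int × Int × String)), Dom_build_heading_hierarchy headings → Spec_build_heading_hierarchy headings (build_heading_hierarchy headings)

-- ===== LEMMAS AND PROOFS =====

-- an abstract stack (used only in the proofs): levels strictly decrease from
-- top (head) to bottom; A's heading_stack dict is this stack reversed
def StackInv (s : List (Int × Int)) : Prop :=
  List.Pairwise (fun a b : Int × Int => b.1 < a.1) s

-- pop every entry of level ≥ `level` off the top of the stack
def popGE (stack : List (Int × Int)) (level : Int) : List (Int × Int) :=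
  match stack with
  | [] => []
  | (l, i) :: rest => if level ≤ l then popGE rest level else (l, i) :: rest

lemma popGE_subset {s : List (Int × Int)} {level : Int} :
    ∀ p ∈ popGE s level, p ∈ s := by
  induction s with
  | nil => simp [popGE]
  | cons hd t ih =>
      obtain ⟨l, i⟩ := hd
      intro p hp
      simp only [popGE] at hp
      split at hp
      · exact List.mem_cons_of_mem _ (ih p hp)
      · exact hp

lemma popGE_inv {s : List (Int × Int)} {level : Int} (h : StackInv s) :
    StackInv (popGE s level) := by
  induction s with
  | nil => simpa [popGE] using h
  | cons hd t ih =>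
      obtain ⟨l, i⟩ := hd
      rw [StackInv, List.pairwise_cons] at h
      obtain ⟨hlt, ht⟩ := h
      simp only [popGE]
      split
      · exact ih ht
      · exact List.pairwise_cons.mpr ⟨hlt, ht⟩

lemma popGE_lt {s : List (Int × Int)} {level : Int} (h : StackInv s) :
    ∀ p ∈ popGE s level, p.1 < level := by
  induction s with
  | nil => simp [popGE]
  | cons hd t ih =>
      obtain ⟨l, i⟩ := hd
      rw [StackInv, List.pairwise_cons] at h
      obtain ⟨hlt, ht⟩ := h
      simp only [popGE]
      split
      · exact ih ht
      · rename_i hle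
        intro p hp
        rcases List.mem_cons.mp hp with rfl | hpt
        · omega
        · have := hlt p hpt; simp at this ⊢; omega

lemma mem_popGE {s : List (Int × Int)} {level : Int} (h : StackInv s)
    {p : Int × Int} (hp : p ∈ s) (hlt : p.1 < level) : p ∈ popGE s level := by
  induction s with
  | nil => simp at hp
  | cons hd t ih =>
      obtain ⟨l, i⟩ := hd
      rw [StackInv, List.pairwise_cons] at h
      obtain ⟨hhd, ht⟩ := h
      simp only [popGE]
      split
      · rename_i hle
        rcases List.mem_cons.mp hp with rfl | hpt
        · simp at hlt; omega
        · exact ih ht hpt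
      · exact hp

lemma popGE_eq_filter {s : List (Int × Int)} {level : Int} (h : StackInv s) :
    popGE s level = s.filter (fun p => decide (p.1 < level)) := by
  induction s with
  | nil => simp [popGE]
  | cons hd t ih =>
      obtain ⟨l, i⟩ := hd
      rw [StackInv, List.pairwise_cons] at h
      obtain ⟨hhd, ht⟩ := h
      simp only [popGE, List.filter_cons]
      by_cases hle : level ≤ l
      · rw [if_pos hle, if_neg (by simp; omega)]
        exact ih ht
      · rw [if_neg hle, if_pos (by simp; omega)]
        symm
        congr 1
        apply List.filter_eq_self.mpr
        intro p hp
        have := hhd p hp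
        simp only [decide_eq_true_eq]
        omega

lemma stackinv_nodup_keys {s : List (Int × Int)} (h : StackInv s) :
    (s.map (fun p : Int × Int => p.1)).Nodup := by
  refine List.pairwise_map.mpr ?_
  exact h.imp (fun hab => by omega)

lemma contains_mk_reverse {s : List (Int × Int)} (k : Int) :
    ((PySem.Dict.mk s.reverse : PySem.Dict Int Int).contains k = true) ↔ ∃ i, (k, i) ∈ s := by
  simp only [PySem.Dict.contains, List.any_eq_true, List.mem_reverse]
  constructor
  · rintro ⟨⟨a, b⟩, hab, he⟩
    simp only [beq_iff_eq] at he
    subst he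
    exact ⟨b, hab⟩
  · rintro ⟨i, hi⟩
    exact ⟨(k, i), hi, by simp⟩

-- items of the clearing loop: erase every key in ks
lemma foldl_erase_items (ks : List Int) (d : PySem.Dict Int Int) :
    (ks.foldl (fun s l => s.erase l) d).items
      = d.items.filter (fun p => !ks.contains p.1) := by
  induction ks generalizing d with
  | nil => simp
  | cons k t ih =>
      rw [List.foldl_cons, ih, PySem.Dict.erase]
      simp only [List.filter_filter]
      apply List.filter_congr
      intro p _
      simp only [List.contains_cons]
      cases p.1 == k <;> simp

-- the A-side filter over a stack with no entry at `level` is exactly popGE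
lemma filter_le_eq_popGE {s : List (Int × Int)} {level : Int} (h : StackInv s)
    (hno : ∀ p ∈ s, p.1 ≠ level) :
    s.filter (fun p => decide (p.1 ≤ level)) = popGE s level := by
  induction s with
  | nil => simp [popGE]
  | cons hd t ih =>
      obtain ⟨l, i⟩ := hd
      rw [StackInv, List.pairwise_cons] at h
      obtain ⟨hhd, ht⟩ := h
      have hne : l ≠ level := hno (l, i) (by simp)
      simp only [popGE]
      by_cases hle : level ≤ l
      · have : ¬ (l ≤ level) := by omega
        simp only [if_pos hle, List.filter_cons, decide_eq_true_eq]
        rw [if_neg this]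
        exact ih ht (fun p hp => hno p (List.mem_cons_of_mem _ hp))
      · have hl : l < level := by omega
        simp only [if_neg hle, List.filter_cons, decide_eq_true_eq]
        rw [if_pos (by omega)]
        congr 1
        apply List.filter_eq_self.mpr
        intro p hp
        have := hhd p hp
        simp only [decide_eq_true_eq]
        omega

-- the A-side map-then-filter over a stack containing `level` keeps exactly the
-- updated entry and the part popGE keeps
lemma map_filter_eq_cons_popGE {s : List (Int × Int)} {level idx : Int}
    (h : StackInv s) {i0 : Int} (hmem : (level, i0) ∈ s) :
    (s.map (fun p => if p.1 == level then (level, idx) else p)).filter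
        (fun p => decide (p.1 ≤ level))
      = (level, idx) :: popGE s level := by
  induction s with
  | nil => simp at hmem
  | cons hd t ih =>
      obtain ⟨l, i⟩ := hd
      rw [StackInv, List.pairwise_cons] at h
      obtain ⟨hhd, ht⟩ := h
      by_cases hl : l = level
      · subst hl
        have hall : ∀ p ∈ t, p.1 < l := fun p hp => hhd p hp
        simp only [List.map_cons, beq_self_eq_true, if_pos, List.filter_cons]
        rw [if_pos (by simp)]
        have hmap : t.map (fun p => if p.1 == l then (l, idx) else p) = t := by
          have := List.map_congr_left (l := t)
            (f := fun p : Int × Int => if p.1 == l then (l, idx) else p) (g := id)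
            (fun p hp => by
              have := hall p hp
              simp only [id]
              rw [if_neg (by simp; omega)])
          rw [this, List.map_id]
        rw [hmap]
        congr 1
        have hfilt : t.filter (fun p => decide (p.1 ≤ l)) = t :=
          List.filter_eq_self.mpr (fun p hp => by have := hall p hp; simp; omega)
        have hpop : popGE ((l, i) :: t) l = popGE t l := by simp [popGE]
        rw [hpop, hfilt]
        cases t with
        | nil => simp [popGE]
        | cons q t' =>
            obtain ⟨lq, iq⟩ := q
            have hlq : lq < l := by have := hall (lq, iq) (by simp); simpa using this
            have : ¬ l ≤ lq := by omega
            simp [popGE, this]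
      · have hmemt : (level, i0) ∈ t := by
          rcases List.mem_cons.mp hmem with heq | hmt
          · exfalso; apply hl; exact (congrArg Prod.fst heq).symm
          · exact hmt
        have hlv : level < l := by
          have := hhd (level, i0) hmemt; simpa using this
        have hbe : ((l : Int) == level) = false := by simpa using hl
        simp only [List.map_cons, hbe, Bool.false_eq_true, if_false, List.filter_cons]
        rw [if_neg (by simp; omega)]
        have hle : level ≤ l := by omega
        simp only [popGE, if_pos hle]
        exact ih ht hmemt

-- parent computation on the A side: dict lookup of level-1 = top-of-popped-stack check
lemma parent_eq {s : List (Int × Int)} {level : Int} (h : StackInv s) :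
    (if (PySem.Dict.mk s.reverse : PySem.Dict Int Int).contains (level - 1) then
        (PySem.Dict.mk s.reverse : PySem.Dict Int Int).get? (level - 1) else none)
      = (match popGE s level with
         | (l, i) :: _ => if l = level - 1 then some i else none
         | [] => none) := by
  have hnd : ((PySem.Dict.mk s.reverse : PySem.Dict Int Int).keys).Nodup := by
    show ((s.reverse).map (fun x : Int × Int => x.1)).Nodup
    rw [List.map_reverse, List.nodup_reverse]
    exact stackinv_nodup_keys h
  cases hpop : popGE s level with
  | nil =>
      have hall : ∀ p ∈ s, level ≤ p.1 := by
        intro p hp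
        by_contra hc
        have := mem_popGE (level := level) h hp (by omega)
        rw [hpop] at this; simp at this
      rw [if_neg ?_]
      intro hc
      obtain ⟨i, hi⟩ := (contains_mk_reverse _).mp hc
      have h2 : level ≤ level - 1 := by simpa using hall (level - 1, i) hi
      omega
  | cons q t =>
      obtain ⟨l, i⟩ := q
      by_cases hl : l = level - 1
      · subst hl
        have hmem : ((level - 1 : Int), i) ∈ s :=
          popGE_subset _ (by rw [hpop]; simp)
        rw [if_pos ((contains_mk_reverse _).mpr ⟨i, hmem⟩)]
        have : (PySem.Dict.mk s.reverse : PySem.Dict Int Int).get? (level - 1) = some i := by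
          apply PySem.Dict.get?_of_mem_items
          · simpa [PySem.Dict.items, List.mem_reverse] using hmem
          · exact hnd
        rw [this]; simp
      · have hlt : l < level :=
          popGE_lt h (l, i) (by rw [hpop]; simp)
        have hinv := popGE_inv (level := level) h
        rw [hpop, StackInv, List.pairwise_cons] at hinv
        obtain ⟨hhd, _⟩ := hinv
        rw [if_neg ?_]
        · simp [hl]
        · intro hc
          obtain ⟨j, hj⟩ := (contains_mk_reverse _).mp hc
          have hj' : ((level - 1 : Int), j) ∈ popGE s level := mem_popGE h hj (by omega)
          rw [hpop] at hj'
          rcases List.mem_cons.mp hj' with heq | hjt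
          · have : level - 1 = l := by simpa using congrArg Prod.fst heq
            exact hl this.symm
          · have := hhd _ hjt; simp at this; omega

-- the whole stack update of A (insert, then clear deeper levels) equals
-- pop-then-push, at the level of items lists
lemma stack_step {s : List (Int × Int)} {level idx : Int} (h : StackInv s) :
    ((((PySem.Dict.mk s.reverse : PySem.Dict Int Int).insert level idx).keys.filter
          (fun l => decide (level < l))).foldl (fun d l => d.erase l)
        ((PySem.Dict.mk s.reverse : PySem.Dict Int Int).insert level idx)).items
      = ((level, idx) :: popGE s level).reverse := by
  set D := (PySem.Dict.mk s.reverse : PySem.Dict Int Int).insert level idx with hD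
  rw [foldl_erase_items]
  have hfc : D.items.filter (fun p => !(D.keys.filter (fun l => decide (level < l))).contains p.1)
      = D.items.filter (fun p => decide (p.1 ≤ level)) := by
    apply List.filter_congr
    intro p hp
    have hk : p.1 ∈ D.keys := by
      simp only [PySem.Dict.keys]; exact List.mem_map_of_mem hp
    rw [List.contains_eq_mem]
    simp only [List.mem_filter, hk, true_and, decide_eq_true_eq]
    by_cases hle : p.1 ≤ level
    · have hnl : ¬ level < p.1 := by omega
      simp [hle, hnl]
    · have hlt : level < p.1 := by omega
      simp [hle, hlt]
  rw [hfc]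
  by_cases hc : (PySem.Dict.mk s.reverse : PySem.Dict Int Int).contains level
  · obtain ⟨i0, hmem⟩ := (contains_mk_reverse _).mp hc
    rw [hD, PySem.Dict.insert, if_pos hc]
    show ((s.reverse.map _).filter _) = _
    rw [List.map_reverse, List.filter_reverse]
    rw [map_filter_eq_cons_popGE h hmem]
  · rw [hD, PySem.Dict.insert, if_neg hc]
    show ((s.reverse ++ [(level, idx)]).filter _) = _
    rw [List.filter_append, List.filter_reverse]
    have hno : ∀ p ∈ s, p.1 ≠ level := by
      intro p hp he
      exact hc ((contains_mk_reverse _).mpr ⟨p.2, by rw [← he]; exact hp⟩)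
    rw [filter_le_eq_popGE h hno]
    simp

-- the B-side backward scan, viewed abstractly: its answer is determined by the
-- first prefix entry of level < the query, which the invariant Inv ties to the
-- top of the popped stack
def RevInv (rev : List (Int × Int)) (s : List (Int × Int)) : Prop :=
  ∀ q : Int, ((rev.find? (fun p => decide (p.2 < q))).map (fun p => (p.2, p.1)))
      = (popGE s q).head?

lemma scanBack_eq_find (rev : List (Int × Int)) (level : Int) :
    scanBack rev level
      = (match rev.find? (fun p => decide (p.2 < level)) with
         | some (j, l) => if l = level - 1 then some j else none
         | none => none) := by
  induction rev with
  | nil => simp [scanBack]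
  | cons hd t ih =>
      obtain ⟨j, l⟩ := hd
      simp only [scanBack, List.find?_cons]
      by_cases h : l < level
      · rw [if_pos (show l ≤ level - 1 by omega)]
        simp [h]
      · rw [if_neg (show ¬ l ≤ level - 1 by omega)]
        simp [h, ih]

lemma inv_nil : RevInv [] [] := by
  intro q; simp [popGE]

lemma inv_step {rev s : List (Int × Int)} {level idx : Int}
    (hs : StackInv s) (h : RevInv rev s) :
    RevInv ((idx, level) :: rev) ((level, idx) :: popGE s level) := by
  intro q
  simp only [List.find?_cons]
  by_cases hq : level < q
  · simp [hq, popGE, show ¬ q ≤ level by omega]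
  · simp only [hq, decide_false]
    have hpop2 : popGE ((level, idx) :: popGE s level) q = popGE s q := by
      simp only [popGE, if_pos (show q ≤ level by omega)]
      rw [popGE_eq_filter (popGE_inv hs), popGE_eq_filter hs, popGE_eq_filter hs,
        List.filter_filter]
      apply List.filter_congr
      intro p _
      by_cases hp : p.1 < q
      · simp [hp, show p.1 < level by omega]
      · simp [hp]
    rw [hpop2]
    exact h q

-- main loop invariant: A's fold appends exactly B's output to the hierarchy items
lemma loop_eq (hs : List (Int × Int × String)) :
    ∀ (idx : Int) (hier : PySem.Dict Int (Option Int)) (s rev : List (Int × Int)),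
      StackInv s → RevInv rev s →
      (∀ k ∈ hier.keys, k < idx) →
      (aLoop hs idx hier (PySem.Dict.mk s.reverse)).items
        = hier.items ++ bLoop hs idx rev := by
  induction hs with
  | nil => intro idx hier s rev _ _ _; simp [aLoop, bLoop]
  | cons hd rest ih =>
      obtain ⟨ln, level, txt⟩ := hd
      intro idx hier s rev hinv hrel hkeys
      simp only [aLoop, bLoop]
      have hpar : (if 2 < level then
            if (PySem.Dict.mk s.reverse : PySem.Dict Int Int).contains (level - 1) then
              (PySem.Dict.mk s.reverse : PySem.Dict Int Int).get? (level - 1)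
            else none else none)
          = (if 2 < level then scanBack rev level else none) := by
        by_cases h2 : 2 < level
        · rw [if_pos h2, if_pos h2, parent_eq hinv, scanBack_eq_find]
          have := hrel level
          cases hfind : rev.find? (fun p => decide (p.2 < level)) with
          | none => rw [hfind] at this; simp at this
                    cases hpop : popGE s level with
                    | nil => simp
                    | cons a b => rw [hpop] at this; simp at this
          | some p =>
              obtain ⟨j, l⟩ := p
              rw [hfind] at this
              cases hpop : popGE s level with
              | nil => rw [hpop] at this; simp at this
              | cons a b =>
                  obtain ⟨al, ai⟩ := a
                  rw [hpop] at this
                  simp only [Option.map_some, List.head?_cons, Option.some.injEq,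
                    Prod.mk.injEq] at this
                  obtain ⟨h1, h2'⟩ := this
                  subst h1; subst h2'
                  simp
        · rw [if_neg h2, if_neg h2]
      have hstk := stack_step (level := level) (idx := idx) hinv
      have hnotc : hier.contains idx = false := by
        rw [PySem.Dict.contains_eq_decide_mem_keys]
        simp only [decide_eq_false_iff_not]
        intro hmem
        have := hkeys idx hmem
        omega
      have hinv' : StackInv ((level, idx) :: popGE s level) := by
        refine List.pairwise_cons.mpr ⟨?_, popGE_inv hinv⟩
        exact fun p hp => popGE_lt hinv p hp
      have hkeys' : ∀ k ∈ (hier.insert idx (if 2 < level then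
            if (PySem.Dict.mk s.reverse : PySem.Dict Int Int).contains (level - 1) then
              (PySem.Dict.mk s.reverse : PySem.Dict Int Int).get? (level - 1)
            else none else none)).keys, k < idx + 1 := by
        intro k hk
        rcases (PySem.Dict.mem_keys_insert _ _ _ _).mp hk with rfl | hk'
        · omega
        · have := hkeys k hk'; omega
      have hstk' : (((PySem.Dict.mk s.reverse : PySem.Dict Int Int).insert level idx).keys.filter
              (fun l => decide (level < l))).foldl (fun d l => d.erase l)
            ((PySem.Dict.mk s.reverse : PySem.Dict Int Int).insert level idx)
          = PySem.Dict.mk (((level, idx) :: popGE s level).reverse) := by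
        apply PySem.Dict.ext
        exact hstk
      rw [hstk', ih (idx + 1) _ _ ((idx, level) :: rev) hinv' (inv_step hinv hrel) hkeys']
      rw [PySem.Dict.items_insert_of_not_contains _ _ hnotc]
      rw [hpar]
      simp

-- ===== VERDICT (by name: the statement is the Claim_ definition above) =====
theorem build_heading_hierarchy_spec : Claim_equal_build_heading_hierarchy := by
  intro headings _
  unfold Spec_build_heading_hierarchy build_heading_hierarchy build_heading_hierarchy_alt
  have h := loop_eq headings 0 PySem.Dict.empty [] [] (by simp [StackInv]) inv_nil
    (by simp [PySem.Dict.keys, PySem.Dict.empty])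
  simpa [PySem.Dict.empty] using h
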